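-- pv_equiv track=rewrite | github.com/austin987/tails | config/chroot_local-includes/usr/local/lib/python3/dist-packages/tailsgreeter/language.py | _timezone_split_area
-- ===== SOURCE A (Python) =====
-- def _timezone_split_area(timezones):
--     timezone_areas = {}
--     for timezone in timezones:
--         area, s, v = timezone.partition('/')
--         if area not in timezone_areas:
--             timezone_areas[area] = set([timezone])
--         else:
--             timezone_areas[area].add(timezone)
--     return timezone_areas
-- ===== SOURCE B (Python) =====
-- def _timezone_split_area(timezones):
--     area = lambda t: t.partition('/')[0]
--     areas = list(dict.fromkeys(map(area, timezones)))
--     return {a: {t for t in timezones if area(t) == a} for a in areas}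
-- ===== Notes on version B (the rewrite author's own statement) =====
-- stated objective: alternative
-- what changed: Replaces the membership-checked incremental dict accumulation by a two-pass grouping: first dedup the area keys in first-occurrence order (dict.fromkeys), then build each group with one comprehension filtering the input by that key.
import Mathlib
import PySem

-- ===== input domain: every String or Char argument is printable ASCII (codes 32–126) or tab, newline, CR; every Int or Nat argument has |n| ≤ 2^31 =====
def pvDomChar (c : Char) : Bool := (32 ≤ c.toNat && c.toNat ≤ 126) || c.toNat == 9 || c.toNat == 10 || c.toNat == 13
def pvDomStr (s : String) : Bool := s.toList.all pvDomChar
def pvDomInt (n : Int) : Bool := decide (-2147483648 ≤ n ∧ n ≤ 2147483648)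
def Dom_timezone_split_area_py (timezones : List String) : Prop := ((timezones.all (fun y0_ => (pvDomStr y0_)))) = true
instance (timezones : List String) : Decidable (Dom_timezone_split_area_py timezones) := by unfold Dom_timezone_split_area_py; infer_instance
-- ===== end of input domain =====

-- B groups via a deduped key list and one filtering pass per area instead of A's membership-checked dict accumulation (alternative decomposition, same values).


-- ===== PORT A =====
-- t.partition('/')[0] — prefix of t before the first '/' (whole string if none); ported by hand
-- (PySem has no partition): exact for a one-character separator.
def pvArea (t : String) : String := String.ofList (t.toList.takeWhile (fun c => c != '/'))

def timezone_split_area_py (timezones : List String) : List (String × List String) :=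
  (timezones.foldl (fun d t =>
      let area := pvArea t
      if d.contains area = false then d.insert area (PySem.Set.ofList [t])
      else d.insert area (PySem.Set.add (d.getD area PySem.Set.empty) t))
    PySem.Dict.empty).items

-- ===== PORT B =====
def timezone_split_area_py_alt (timezones : List String) : List (String × List String) :=
  (PySem.List.dedup (timezones.map pvArea)).map
    (fun a => (a, PySem.Set.ofList (timezones.filter (fun t => pvArea t == a))))

-- ===== PRECONDITION & SPEC =====
def Spec_timezone_split_area_py (timezones : List String) (out : List (String × List String)) : Prop := out = timezone_split_area_py_alt timezones
instance (timezones : List String) (out : List (String × List String)) : Decidable (Spec_timezone_split_area_py timezones out) := by unfold Spec_timezone_split_area_py; infer_instance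

-- ===== CLAIM (what is proved, stated in full; the proofs are below) =====
def Claim_equal_timezone_split_area_py : Prop := ∀ (timezones : List String), Dom_timezone_split_area_py timezones → Spec_timezone_split_area_py timezones (timezone_split_area_py timezones)

-- ===== LEMMAS AND PROOFS =====

lemma pv_ofList_concat {α : Type} [BEq α] (l : List α) (x : α) :
    PySem.Set.ofList (l ++ [x]) = PySem.Set.add (PySem.Set.ofList l) x := by
  rw [PySem.Set.ofList_eq_foldl, PySem.Set.ofList_eq_foldl, List.foldl_append]
  rfl

lemma pv_add_of_mem (s : PySem.Set String) (x : String) (h : x ∈ s) : PySem.Set.add s x = s := by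
  simp [PySem.Set.add, h]

lemma pv_add_of_not_mem (s : PySem.Set String) (x : String) (h : x ∉ s) : PySem.Set.add s x = s ++ [x] := by
  simp [PySem.Set.add, h]

lemma pv_main (ts : List String) :
    (ts.foldl (fun d t =>
        let area := pvArea t
        if d.contains area = false then d.insert area (PySem.Set.ofList [t])
        else d.insert area (PySem.Set.add (d.getD area PySem.Set.empty) t))
      PySem.Dict.empty).items
    = (PySem.Set.ofList (ts.map pvArea)).map
        (fun a => (a, PySem.Set.ofList (ts.filter (fun t => pvArea t == a)))) := by
  induction ts using List.reverseRecOn with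
  | nil => rfl
  | append_singleton ts t ih =>
    rw [List.foldl_append]
    set D := (ts.foldl (fun d t =>
        let area := pvArea t
        if d.contains area = false then d.insert area (PySem.Set.ofList [t])
        else d.insert area (PySem.Set.add (d.getD area PySem.Set.empty) t))
      PySem.Dict.empty) with hD
    have hkeys : D.keys = PySem.Set.ofList (ts.map pvArea) := by
      show D.items.map (·.1) = _
      rw [ih, List.map_map]
      exact List.map_id _
    have hnd : D.keys.Nodup := by rw [hkeys]; exact PySem.Set.nodup_ofList _
    have hcont : D.contains (pvArea t) = decide (pvArea t ∈ ts.map pvArea) := by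
      rw [PySem.Dict.contains_eq_decide_mem_keys, hkeys]
      simp [PySem.Set.mem_ofList]
    simp only [List.foldl_cons, List.foldl_nil]
    simp only [List.map_append, List.map_cons, List.map_nil, List.filter_append]
    rw [pv_ofList_concat]
    by_cases hmem : pvArea t ∈ ts.map pvArea
    · -- existing key
      have hc : D.contains (pvArea t) = true := by rw [hcont]; simp [hmem]
      have hmemS : pvArea t ∈ PySem.Set.ofList (ts.map pvArea) := by
        rw [PySem.Set.mem_ofList]; exact hmem
      rw [pv_add_of_mem _ _ hmemS]
      have hitem : (pvArea t, PySem.Set.ofList (ts.filter (fun t' => pvArea t' == pvArea t))) ∈ D.items := by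
        rw [ih]; exact List.mem_map_of_mem hmemS
      have hgetD : D.getD (pvArea t) PySem.Set.empty
          = PySem.Set.ofList (ts.filter (fun t' => pvArea t' == pvArea t)) :=
        PySem.Dict.getD_of_mem_items D hitem hnd PySem.Set.empty
      rw [hc]
      rw [if_neg (by simp)]
      rw [PySem.Dict.items_insert_of_contains _ _ hc, ih]
      rw [List.map_map]
      apply List.map_congr_left
      intro a ha
      by_cases hax : a = pvArea t
      · subst hax
        simp only [Function.comp, BEq.rfl, if_pos]
        rw [hgetD, ← pv_ofList_concat]
        simp
      · have : (a == pvArea t) = false := by simp [hax]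
        simp only [Function.comp]
        rw [if_neg (by simp [hax])]
        have : (pvArea t == a) = false := by simp [Ne.symm hax]
        simp [this]
    · -- fresh key
      have hc : D.contains (pvArea t) = false := by rw [hcont]; simp [hmem]
      have hmemS : pvArea t ∉ PySem.Set.ofList (ts.map pvArea) := by
        rw [PySem.Set.mem_ofList]; exact hmem
      rw [pv_add_of_not_mem _ _ hmemS]
      rw [hc, if_pos rfl]
      rw [PySem.Dict.items_insert_of_not_contains _ _ hc, ih]
      rw [List.map_append]
      congr 1
      · apply List.map_congr_left
        intro a ha
        have haL : a ∈ ts.map pvArea := (PySem.Set.mem_ofList _ _).1 ha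
        have : (pvArea t == a) = false := by
          simp only [beq_eq_false_iff_ne, ne_eq]
          intro h; exact hmem (h ▸ haL)
        simp [this]
      · have hfilter : ts.filter (fun t' => pvArea t' == pvArea t) = [] := by
          rw [List.filter_eq_nil_iff]
          intro t' ht' h
          have : pvArea t' = pvArea t := by simpa using h
          exact hmem (this ▸ List.mem_map_of_mem ht')
        simp [hfilter]

-- ===== VERDICT (by name: the statement is the Claim_ definition above) =====
theorem timezone_split_area_py_spec : Claim_equal_timezone_split_area_py := by
  intro ts _
  unfold Spec_timezone_split_area_py timezone_split_area_py timezone_split_area_py_alt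
  simp only [PySem.List.dedup_eq_ofList]
  exact pv_main ts
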